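-- pv_equiv track=rewrite | github.com/taoshen58/DiSAN | SST_disan/src/utils/nlp.py | gene_question_explicit_class_tag
-- ===== SOURCE A (Python) =====
-- def gene_question_explicit_class_tag(question_token):
--     classes = ['what', 'how', 'who', 'when', 'which', 'where', 'why', 'whom', 'whose',
--                ['am', 'is', 'are', 'was', 'were']]
--     question_token = [token.lower() for token in question_token]
--
--     for idx_c, cls in enumerate(classes):
--         if not isinstance(cls, list):
--             if cls in question_token:
--                 return idx_c
--         else:
--             for ccls in cls:
--                 if ccls in question_token:
--                     return idx_c
--     return len(classes)
-- ===== SOURCE B (Python) =====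
-- def gene_question_explicit_class_tag(question_token):
--     lookup = {'what': 0, 'how': 1, 'who': 2, 'when': 3, 'which': 4, 'where': 5,
--               'why': 6, 'whom': 7, 'whose': 8,
--               'am': 9, 'is': 9, 'are': 9, 'was': 9, 'were': 9}
--     best = 10
--     for token in question_token:
--         idx = lookup.get(token.lower())
--         if idx is not None and idx < best:
--             best = idx
--     return best
-- ===== Notes on version B (the rewrite author's own statement) =====
-- stated objective: faster
-- what changed: Replaced the class-by-class scan, each doing membership tests over the whole token list, by a keyword->index dict and a single min-reducing pass over the tokens.
import Mathlib
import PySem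

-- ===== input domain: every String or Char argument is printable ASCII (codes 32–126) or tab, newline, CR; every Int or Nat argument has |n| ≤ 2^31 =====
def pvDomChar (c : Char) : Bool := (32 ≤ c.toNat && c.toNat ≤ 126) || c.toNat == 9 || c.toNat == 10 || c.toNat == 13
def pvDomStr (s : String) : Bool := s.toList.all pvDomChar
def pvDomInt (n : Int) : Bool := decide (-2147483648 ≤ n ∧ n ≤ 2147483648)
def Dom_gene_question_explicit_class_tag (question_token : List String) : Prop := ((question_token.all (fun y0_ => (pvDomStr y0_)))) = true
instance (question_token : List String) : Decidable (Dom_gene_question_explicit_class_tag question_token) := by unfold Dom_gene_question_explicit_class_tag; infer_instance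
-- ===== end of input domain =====

-- B replaces A's class-by-class scan (membership tests over the token list) by a
-- keyword->index table and a single min-reducing pass over the tokens; same result, alternative structure.


-- ===== PORT A =====
-- Python's `classes` mixes lone strings and one list; a lone string class behaves exactly like a
-- singleton list (the `isinstance` branch), so the constant is represented as List (List String).
def pvAClasses : List (List String) :=
  [["what"], ["how"], ["who"], ["when"], ["which"], ["where"], ["why"], ["whom"], ["whose"],
   ["am", "is", "are", "was", "were"]]

-- the `for idx_c, cls in enumerate(classes)` loop with early return; falling off returns len(classes) = 10
def pvALoop (cs : List (List String)) (idx : Int) (qt : List String) : Int :=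
  match cs with
  | [] => 10
  | cls :: rest => if cls.any (fun c => qt.contains c) then idx else pvALoop rest (idx + 1) qt

def gene_question_explicit_class_tag (question_token : List String) : Int :=
  pvALoop pvAClasses 0 (question_token.map PySem.Str.lower)

-- ===== PORT B =====
def pvLookup : PySem.Dict String Int :=
  PySem.Dict.ofList [("what", 0), ("how", 1), ("who", 2), ("when", 3), ("which", 4),
                     ("where", 5), ("why", 6), ("whom", 7), ("whose", 8),
                     ("am", 9), ("is", 9), ("are", 9), ("was", 9), ("were", 9)]

def gene_question_explicit_class_tag_alt (question_token : List String) : Int :=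
  question_token.foldl (fun best token =>
    match pvLookup.get? (PySem.Str.lower token) with
    | some idx => if idx < best then idx else best
    | none => best) 10

-- ===== PRECONDITION & SPEC =====
def Spec_gene_question_explicit_class_tag (question_token : List String) (out : Int) : Prop := out = gene_question_explicit_class_tag_alt question_token
instance (question_token : List String) (out : Int) : Decidable (Spec_gene_question_explicit_class_tag question_token out) := by unfold Spec_gene_question_explicit_class_tag; infer_instance

-- ===== CLAIM (what is proved, stated in full; the proofs are below) =====
def Claim_equal_gene_question_explicit_class_tag : Prop := ∀ (question_token : List String), Dom_gene_question_explicit_class_tag question_token → Spec_gene_question_explicit_class_tag question_token (gene_question_explicit_class_tag question_token)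

-- ===== LEMMAS AND PROOFS =====

-- A's class scan applied to an already lowered token list
def pvAchain (M : List String) : Int := pvALoop pvAClasses 0 M

-- B's table value for one lowered token, with the no-match default 10
def pvIdxD (t : String) : Int := (pvLookup.get? t).getD 10

lemma pvLookup_mk : pvLookup = PySem.Dict.mk
    [("what", 0), ("how", 1), ("who", 2), ("when", 3), ("which", 4), ("where", 5),
     ("why", 6), ("whom", 7), ("whose", 8), ("am", 9), ("is", 9), ("are", 9),
     ("was", 9), ("were", 9)] := rfl

lemma pvALoop_bounds (cs : List (List String)) (i : Int) (M : List String)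
    (h : i + cs.length ≤ 10) : i ≤ pvALoop cs i M ∧ pvALoop cs i M ≤ 10 := by
  induction cs generalizing i with
  | nil => simp [pvALoop]; omega
  | cons cls rest ih =>
    simp only [pvALoop]
    simp only [List.length_cons] at h
    split_ifs with hc
    · omega
    · have := ih (i + 1) (by push_cast at h ⊢; omega)
      omega

-- prepending a token to the scanned list takes the min with the token's own scan result
lemma pvALoop_cons (cs : List (List String)) (i : Int) (t : String) (M : List String)
    (h : i + cs.length ≤ 10) :
    pvALoop cs i (t :: M) = min (pvALoop cs i [t]) (pvALoop cs i M) := by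
  induction cs generalizing i with
  | nil => simp [pvALoop]
  | cons cls rest ih =>
    simp only [List.length_cons] at h
    have hlen : (i + 1) + (rest.length : Int) ≤ 10 := by push_cast at h ⊢; omega
    have hC : (cls.any (fun c => (t :: M).contains c) = true) ↔
        (cls.any (fun c => [t].contains c) = true ∨ cls.any (fun c => M.contains c) = true) := by
      simp only [List.any_eq_true, List.contains_cons, List.contains_nil, Bool.or_false,
        Bool.or_eq_true]
      constructor
      · rintro ⟨c, hc, h1 | h2⟩
        exacts [Or.inl ⟨c, hc, h1⟩, Or.inr ⟨c, hc, h2⟩]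
      · rintro (⟨c, hc, h1⟩ | ⟨c, hc, h2⟩)
        exacts [⟨c, hc, Or.inl h1⟩, ⟨c, hc, Or.inr h2⟩]
    simp only [pvALoop]
    by_cases hA : cls.any (fun c => [t].contains c) = true
    · rw [if_pos (hC.mpr (Or.inl hA)), if_pos hA]
      by_cases hB : cls.any (fun c => M.contains c) = true
      · rw [if_pos hB]; omega
      · rw [if_neg hB]
        have := pvALoop_bounds rest (i + 1) M hlen
        omega
    · by_cases hB : cls.any (fun c => M.contains c) = true
      · rw [if_pos (hC.mpr (Or.inr hB)), if_neg hA, if_pos hB]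
        have := pvALoop_bounds rest (i + 1) [t] hlen
        omega
      · rw [if_neg (fun hx => (hC.mp hx).elim hA hB), if_neg hA, if_neg hB]
        exact ih (i + 1) hlen

lemma pvAchain_cons (t : String) (M : List String) :
    pvAchain (t :: M) = min (pvAchain [t]) (pvAchain M) :=
  pvALoop_cons pvAClasses 0 t M (by norm_num [pvAClasses])

-- B's table agrees with A's scan on a single token
lemma pvIdx_single (t : String) : pvIdxD t = pvAchain [t] := by
  by_cases h0 : t = "what"
  · subst h0; rfl
  by_cases h1 : t = "how"
  · subst h1; rfl
  by_cases h2 : t = "who"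
  · subst h2; rfl
  by_cases h3 : t = "when"
  · subst h3; rfl
  by_cases h4 : t = "which"
  · subst h4; rfl
  by_cases h5 : t = "where"
  · subst h5; rfl
  by_cases h6 : t = "why"
  · subst h6; rfl
  by_cases h7 : t = "whom"
  · subst h7; rfl
  by_cases h8 : t = "whose"
  · subst h8; rfl
  by_cases h9 : t = "am"
  · subst h9; rfl
  by_cases h10 : t = "is"
  · subst h10; rfl
  by_cases h11 : t = "are"
  · subst h11; rfl
  by_cases h12 : t = "was"
  · subst h12; rfl
  by_cases h13 : t = "were"
  · subst h13; rfl
  have hget : pvIdxD t = 10 := by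
    simp [pvIdxD, pvLookup_mk, PySem.Dict.get?, Ne.symm h0, Ne.symm h1, Ne.symm h2,
      Ne.symm h3, Ne.symm h4, Ne.symm h5, Ne.symm h6, Ne.symm h7, Ne.symm h8,
      Ne.symm h9, Ne.symm h10, Ne.symm h11, Ne.symm h12, Ne.symm h13]
  rw [hget]
  simp only [pvAchain, pvAClasses, pvALoop, List.any_cons, List.any_nil, List.contains_cons,
    List.contains_nil]
  simp [Ne.symm h0, Ne.symm h1, Ne.symm h2, Ne.symm h3, Ne.symm h4, Ne.symm h5, Ne.symm h6,
    Ne.symm h7, Ne.symm h8, Ne.symm h9, Ne.symm h10, Ne.symm h11, Ne.symm h12, Ne.symm h13]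

lemma pvFold_eq (M : List String) (b : Int) (hb : b ≤ 10) :
    M.foldl (fun best t =>
      match pvLookup.get? t with
      | some idx => if idx < best then idx else best
      | none => best) b = min b (pvAchain M) := by
  induction M generalizing b with
  | nil =>
    have h10 : pvAchain [] = 10 := by decide
    simp [h10]; omega
  | cons t M ih =>
    have hstep : (match pvLookup.get? t with
        | some idx => if idx < b then idx else b
        | none => b) = min b (pvIdxD t) := by
      cases hv : pvLookup.get? t with
      | none => simp [pvIdxD, hv]; omega
      | some v => simp only [pvIdxD, hv, Option.getD_some, min_def]; split_ifs <;> omega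
    have hb1 : pvIdxD t ≤ 10 := by
      rw [pvIdx_single]
      exact (pvALoop_bounds pvAClasses 0 [t] (by norm_num [pvAClasses])).2
    rw [List.foldl_cons, hstep, ih _ (by omega), pvAchain_cons, ← pvIdx_single]
    omega

-- ===== VERDICT (by name: the statement is the Claim_ definition above) =====
theorem gene_question_explicit_class_tag_spec : Claim_equal_gene_question_explicit_class_tag := by
  intro qt _
  have halt : gene_question_explicit_class_tag_alt qt
      = (qt.map PySem.Str.lower).foldl (fun best t =>
          match pvLookup.get? t with
          | some idx => if idx < best then idx else best
          | none => best) 10 := by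
    unfold gene_question_explicit_class_tag_alt
    rw [List.foldl_map]
  unfold Spec_gene_question_explicit_class_tag gene_question_explicit_class_tag
  rw [halt, pvFold_eq _ _ (by omega)]
  have hb := pvALoop_bounds pvAClasses 0 (qt.map PySem.Str.lower) (by norm_num [pvAClasses])
  show pvAchain (qt.map PySem.Str.lower) = _
  unfold pvAchain
  omega
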